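-- pv_equiv track=rewrite | github.com/mld-0/leetcode | 294-flip-game-ii.py | canWin_ans_GameTheory
-- ===== SOURCE A (Python) =====
-- def canWin_ans_GameTheory(currentState: str) -> bool:
--
--     def firstMissingNumber(lut):
--         m = len(lut)
--         for i in range(m):
--             if i not in lut:
--                 return i
--         return m
--
--     s = [ c for c in currentState ]
--     curlen = 0
--     maxlen = 0
--     board_init_state = []
--     for i in range(len(s)):
--         if s[i] == '+': curlen += 1
--         if i+1 == len(s) or s[i] == '-':
--             if curlen >= 2: board_init_state.append(curlen)
--             maxlen = max(maxlen, curlen)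
--             curlen = 0
--
--     g = [0] * (maxlen+1)
--     for l in range(2, maxlen+1):
--         gsub = set()
--         for l_first_game in range(0, l//2):
--             l_second_game = l - l_first_game - 2
--             gsub.add(g[l_first_game] ^ g[l_second_game])
--         g[l] = firstMissingNumber(gsub)
--
--     g_final = 0
--     for s in board_init_state:
--         g_final ^= g[s]
--     return g_final != 0
-- ===== SOURCE B (Python) =====
-- # B: memoized mex-recursion for the run Grundy values (top-down, full split range)
-- # instead of A's bottom-up half-range DP table, and split-based run extraction
-- # instead of A's per-index counter scan. As in A, characters other than the two
-- # board characters are ignored (they neither extend nor break a run).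
-- def canWin_ans_GameTheory(currentState: str) -> bool:
--     def grundy(l, memo):
--         if l in memo:
--             return memo[l]
--         seen = set()
--         for i in range(l - 1):
--             seen.add(grundy(i, memo) ^ grundy(l - 2 - i, memo))
--         g = 0
--         while g in seen:
--             g += 1
--         memo[l] = g
--         return g
--
--     memo = {}
--     total = 0
--     for seg in ''.join(c for c in currentState if c in '+-').split('-'):
--         total ^= grundy(len(seg), memo)
--     return total != 0
-- ===== Notes on version B (the rewrite author's own statement) =====
-- stated objective: faster
-- what changed: Run extraction by filtering to the two board characters and splitting on the dash replaces A's per-index counter scan, and each run's Grundy value is computed by a top-down memoized mex-recursion over the full split range instead of A's bottom-up half-range DP table with a separate first-missing-number scan.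
import Mathlib
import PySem

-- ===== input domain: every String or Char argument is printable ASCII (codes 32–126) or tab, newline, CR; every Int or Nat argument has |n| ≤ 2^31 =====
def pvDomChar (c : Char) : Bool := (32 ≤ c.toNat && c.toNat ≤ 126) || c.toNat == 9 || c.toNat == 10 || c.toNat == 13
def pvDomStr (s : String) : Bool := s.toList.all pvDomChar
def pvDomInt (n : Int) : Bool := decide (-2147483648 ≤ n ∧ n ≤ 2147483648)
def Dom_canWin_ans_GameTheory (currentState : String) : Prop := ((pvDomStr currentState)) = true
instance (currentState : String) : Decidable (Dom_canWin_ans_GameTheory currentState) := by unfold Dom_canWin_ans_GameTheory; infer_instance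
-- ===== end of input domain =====

-- B replaces A's bottom-up half-range Grundy DP table and per-index counter run scan by a
-- top-down memoized mex-recursion (full split range) over run lengths obtained by filtering
-- to the two board characters and splitting on the dash (measured constant-factor faster).

-- ===== PORT A =====
-- A's helper firstMissingNumber(lut): for i in range(len(lut)): if i not in lut: return i; return len(lut)
def fmnA (lut : PySem.Set Int) : Int :=
  let m : Int := PySem.Set.len lut
  match (PySem.List.pyRange 0 m 1).find? (fun i => !(PySem.Set.contains lut i)) with
  | some i => i
  | none => m

def canWin_ans_GameTheory (currentState : String) : Bool :=
  let s := currentState.toList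
  -- for i in range(len(s)): … state (curlen, maxlen, board_init_state)
  let st := (PySem.List.pyRange 0 (s.length : Int) 1).foldl
    (fun (st : Int × Int × List Int) i =>
      let curlen := if PySem.List.pyGetD s i ' ' = '+' then st.1 + 1 else st.1
      if i + 1 = (s.length : Int) ∨ PySem.List.pyGetD s i ' ' = '-' then
        ((0 : Int), max st.2.1 curlen, if 2 ≤ curlen then st.2.2 ++ [curlen] else st.2.2)
      else
        (curlen, st.2.1, st.2.2))
    ((0 : Int), (0 : Int), ([] : List Int))
  let maxlen := st.2.1
  let board := st.2.2
  -- g = [0]*(maxlen+1); for l in range(2, maxlen+1): …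
  let g := (PySem.List.pyRange 2 (maxlen + 1) 1).foldl
    (fun g l =>
      let gsub := (PySem.List.pyRange 0 (PySem.Int.floordiv l 2) 1).foldl
        (fun (sub : PySem.Set Int) a =>
          PySem.Set.add sub (PySem.Int.bxor (PySem.List.pyGetD g a 0) (PySem.List.pyGetD g (l - a - 2) 0)))
        PySem.Set.empty
      PySem.List.pySetD g l (fmnA gsub))
    (List.replicate (maxlen + 1).toNat (0 : Int))
  let gfinal := board.foldl (fun acc r => PySem.Int.bxor acc (PySem.List.pyGetD g r 0)) 0
  gfinal != 0

-- ===== PORT B =====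
-- B's 'g = 0; while g in seen: g += 1' (all values are nonnegative, so Nat is exact)
def bMex (seen : List Nat) (g : Nat) : Nat :=
  if g ∈ seen then bMex seen (g + 1) else g
termination_by (seen.filter (fun x => g ≤ x)).length
decreasing_by
  have h1 : seen.filter (fun x => decide (g + 1 ≤ x)) =
      (seen.filter (fun x => decide (g ≤ x))).filter (fun x => decide (g + 1 ≤ x)) := by
    rw [List.filter_filter]
    apply List.filter_congr
    intro x _
    by_cases h : g + 1 ≤ x
    · simp [h]; omega
    · simp [h]
  rw [h1, List.length_filter_lt_length_iff_exists]
  exact ⟨g, by simpa using ‹g ∈ seen›, by simp⟩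

mutual
-- B's grundy(l, memo) with the memo dict threaded explicitly
def bGrundy (l : Nat) (memo : PySem.Dict Nat Nat) : Nat × PySem.Dict Nat Nat :=
  match memo.get? l with
  | some g => (g, memo)
  | none =>
    let sm := bGrundyLoop l 0 PySem.Set.empty memo
    let g := bMex sm.1 0
    (g, sm.2.insert l g)
termination_by (l, 1, 0)

-- B's 'for i in range(l - 1): seen.add(grundy(i, memo) ^ grundy(l - 2 - i, memo))'
def bGrundyLoop (l i : Nat) (seen : PySem.Set Nat) (memo : PySem.Dict Nat Nat) :
    PySem.Set Nat × PySem.Dict Nat Nat :=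
  if _h : i < l - 1 then
    let am := bGrundy i memo
    let bm := bGrundy (l - 2 - i) am.2
    bGrundyLoop l (i + 1) (PySem.Set.add seen (am.1 ^^^ bm.1)) bm.2
  else (seen, memo)
termination_by (l, 0, l - 1 - i)
end

def canWin_ans_GameTheory_alt (currentState : String) : Bool :=
  -- ''.join(c for c in currentState if c in '+-')  ('c in "+-"' on a char is c = '+' or c = '-')
  let t := currentState.toList.filter (fun c => c = '+' || c = '-')
  let segs := PySem.Chars.splitOn t ['-']
  let st := segs.foldl (fun (st : Nat × PySem.Dict Nat Nat) seg =>
      let gm := bGrundy seg.length st.2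
      (st.1 ^^^ gm.1, gm.2)) (0, PySem.Dict.empty)
  st.1 != 0

-- ===== PRECONDITION & SPEC =====
def Spec_canWin_ans_GameTheory (currentState : String) (out : Bool) : Prop := out = canWin_ans_GameTheory_alt currentState
instance (currentState : String) (out : Bool) : Decidable (Spec_canWin_ans_GameTheory currentState out) := by unfold Spec_canWin_ans_GameTheory; infer_instance

-- ===== CLAIM (what is proved, stated in full; the proofs are below) =====
def Claim_equal_canWin_ans_GameTheory : Prop := ∀ (currentState : String), Dom_canWin_ans_GameTheory currentState → Spec_canWin_ans_GameTheory currentState (canWin_ans_GameTheory currentState)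

-- ===== LEMMAS AND PROOFS =====

-- Canonical run lengths of the '+'-segments of s ('-' closes a run, other chars are inert).
def runsC (cur : Nat) : List Char → List Nat
  | [] => [cur]
  | c :: rest =>
    if c = '+' then runsC (cur + 1) rest
    else if c = '-' then cur :: runsC 0 rest
    else runsC cur rest

-- Same, split as (closed runs, trailing open run).
def runsP (cur : Nat) : List Char → List Nat × Nat
  | [] => ([], cur)
  | c :: rest =>
    if c = '+' then runsP (cur + 1) rest
    else if c = '-' then ((runsP 0 rest).1.cons cur, (runsP 0 rest).2)
    else runsP cur rest

-- Reference form of PySem.Chars.splitOn · ['-'].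
def pySplitDash (pre : List Char) : List Char → List (List Char)
  | [] => [pre]
  | c :: rest => if c = '-' then pre :: pySplitDash [] rest else pySplitDash (pre ++ [c]) rest

def mfold (mx : Int) (rs : List Nat) : Int := rs.foldl (fun m r => max m (r : Int)) mx

-- The true Grundy value of a run of length l.
def Gm (l : Nat) : Nat :=
  bMex ((List.range (l - 1)).attach.map (fun i => Gm i.1 ^^^ Gm (l - 2 - i.1))) 0
decreasing_by
  · have := List.mem_range.mp i.2; omega
  · have := List.mem_range.mp i.2; omega

def xorG (rs : List Nat) : Nat := rs.foldl (fun t r => t ^^^ Gm r) 0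

-- mex characterisation
theorem bMex_spec (seen : List Nat) (g : Nat) :
    bMex seen g ∉ seen ∧ g ≤ bMex seen g ∧ ∀ j, g ≤ j → j < bMex seen g → j ∈ seen := by
  induction g using bMex.induct (seen := seen) with
  | case1 g hg ih =>
    rw [bMex]
    simp only [if_pos hg]
    refine ⟨ih.1, by omega, ?_⟩
    intro j hj1 hj2
    rcases Nat.eq_or_lt_of_le hj1 with rfl | h
    · exact hg
    · exact ih.2.2 j (by omega) hj2
  | case2 g hg =>
    rw [bMex]
    simp only [if_neg hg]
    exact ⟨hg, le_refl _, fun j h1 h2 => absurd (lt_of_le_of_lt h1 h2) (lt_irrefl _)⟩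

theorem bMex_eq_of {seen : List Nat} {k : Nat} (h1 : k ∉ seen) (h2 : ∀ j < k, j ∈ seen) :
    bMex seen 0 = k := by
  obtain ⟨hn, -, hall⟩ := bMex_spec seen 0
  rcases lt_trichotomy (bMex seen 0) k with h | h | h
  · exact absurd (h2 _ h) hn
  · exact h
  · exact absurd (hall k (Nat.zero_le _) h) h1

theorem bMex_congr {s t : List Nat} (h : ∀ x, x ∈ s ↔ x ∈ t) : bMex s 0 = bMex t 0 := by
  obtain ⟨hn, -, hall⟩ := bMex_spec t 0
  exact bMex_eq_of (fun hm => hn ((h _).mp hm)) (fun j hj => (h _).mpr (hall j (Nat.zero_le _) hj))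

theorem Gm_def (l : Nat) :
    Gm l = bMex ((List.range (l - 1)).attach.map (fun i => Gm i.1 ^^^ Gm (l - 2 - i.1))) 0 := by
  rw [Gm]

theorem mem_GmList (l x : Nat) :
    x ∈ (List.range (l - 1)).attach.map (fun i => Gm i.1 ^^^ Gm (l - 2 - i.1)) ↔
      ∃ i, i < l - 1 ∧ x = Gm i ^^^ Gm (l - 2 - i) := by
  simp [List.mem_map, List.mem_range]
  constructor
  · rintro ⟨i, hi, rfl⟩; exact ⟨i, hi, rfl⟩
  · rintro ⟨i, hi, rfl⟩; exact ⟨i, hi, rfl⟩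

theorem Gm_small {l : Nat} (h : l < 2) : Gm l = 0 := by
  rw [Gm_def]
  have : l - 1 = 0 := by omega
  rw [this]
  simp [List.range_zero, bMex]

-- B-side correctness
def InvM (memo : PySem.Dict Nat Nat) : Prop := ∀ k v, memo.get? k = some v → v = Gm k

theorem bGrundyLoop_correct (l : Nat)
    (HB : ∀ l' memo, l' < l → InvM memo →
      (bGrundy l' memo).1 = Gm l' ∧ InvM (bGrundy l' memo).2) :
    ∀ n i seen memo, n = l - 1 - i → InvM memo →
      InvM (bGrundyLoop l i seen memo).2 ∧
      ∀ x, x ∈ (bGrundyLoop l i seen memo).1 ↔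
        x ∈ seen ∨ ∃ j, i ≤ j ∧ j < l - 1 ∧ x = Gm j ^^^ Gm (l - 2 - j) := by
  intro n
  induction n with
  | zero =>
    intro i seen memo hn hInv
    have hge : ¬ i < l - 1 := by omega
    rw [bGrundyLoop]
    simp only [hge, dif_neg, not_false_iff]
    refine ⟨hInv, ?_⟩
    intro x
    constructor
    · intro h; exact Or.inl h
    · rintro (h | ⟨j, hj1, hj2, _⟩)
      · exact h
      · omega
  | succ n ihn =>
    intro i seen memo hn hInv
    have hlt : i < l - 1 := by omega
    rw [bGrundyLoop]
    simp only [hlt, dif_pos]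
    obtain ⟨ha1, ha2⟩ := HB i memo (by omega) hInv
    obtain ⟨hb1, hb2⟩ := HB (l - 2 - i) (bGrundy i memo).2 (by omega) ha2
    obtain ⟨hI, hM⟩ := ihn (i + 1)
      (PySem.Set.add seen ((bGrundy i memo).1 ^^^ (bGrundy (l - 2 - i) (bGrundy i memo).2).1))
      (bGrundy (l - 2 - i) (bGrundy i memo).2).2 (by omega) hb2
    refine ⟨hI, ?_⟩
    intro x
    rw [hM x, PySem.Set.mem_add, ha1, hb1]
    constructor
    · rintro ((h | h) | ⟨j, hj1, hj2, rfl⟩)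
      · exact Or.inl h
      · exact Or.inr ⟨i, le_refl _, hlt, h⟩
      · exact Or.inr ⟨j, by omega, hj2, rfl⟩
    · rintro (h | ⟨j, hj1, hj2, rfl⟩)
      · exact Or.inl (Or.inl h)
      · rcases Nat.eq_or_lt_of_le hj1 with rfl | hgt
        · exact Or.inl (Or.inr rfl)
        · exact Or.inr ⟨j, by omega, hj2, rfl⟩

theorem bGrundy_correct : ∀ l memo, InvM memo →
    (bGrundy l memo).1 = Gm l ∧ InvM (bGrundy l memo).2 := by
  intro l
  induction l using Nat.strong_induction_on with
  | _ l IH =>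
    intro memo hInv
    rw [bGrundy]
    cases hm : memo.get? l with
    | some g => exact ⟨hInv l g hm, by simpa [hm] using hInv⟩
    | none =>
      simp only
      obtain ⟨hI, hM⟩ := bGrundyLoop_correct l (fun l' m hl hm' => IH l' hl m hm')
        (l - 1 - 0) 0 PySem.Set.empty memo rfl hInv
      have hmex : bMex (bGrundyLoop l 0 PySem.Set.empty memo).1 0 = Gm l := by
        rw [Gm_def l]
        apply bMex_congr
        intro x
        rw [hM x, mem_GmList]
        constructor
        · rintro (h | ⟨j, hj1, hj2, rfl⟩)
          · cases h
          · exact ⟨j, hj2, rfl⟩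
        · rintro ⟨j, hj, rfl⟩
          exact Or.inr ⟨j, Nat.zero_le _, hj, rfl⟩
      constructor
      · exact hmex
      · intro k v hk
        by_cases hkl : k = l
        · subst hkl
          rw [PySem.Dict.get?_insert_self] at hk
          cases hk
          exact hmex
        · rw [PySem.Dict.get?_insert_of_ne _ _ hkl] at hk
          exact hI k v hk

-- splitOn · ['-'] is pySplitDash
theorem go_eq (t : List Char) : ∀ (fuel : Nat) (pre : List Char) (acc : List (List Char)),
    t.length < fuel →
    PySem.Chars.splitOn.go ['-'] fuel t pre acc = acc.reverse ++ pySplitDash pre.reverse t := by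
  induction t with
  | nil =>
    intro fuel pre acc hf
    cases fuel with
    | zero => omega
    | succ f =>
      rw [PySem.Chars.splitOn.go]
      simp [pySplitDash]
      omega
  | cons c rest ih =>
    intro fuel pre acc hf
    cases fuel with
    | zero => omega
    | succ fuel =>
      rw [PySem.Chars.splitOn.go]
      by_cases hc : c = '-'
      · subst hc
        have hp : List.isPrefixOf ['-'] ('-' :: rest) = true := by
          simp [List.isPrefixOf]
        simp only [hp, if_true, List.length_singleton, List.drop_succ_cons, List.drop_zero]
        rw [ih _ _ _ (by simpa using Nat.lt_of_succ_lt_succ hf)]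
        simp [pySplitDash]
      · have hp : List.isPrefixOf ['-'] (c :: rest) = false := by
          simp [List.isPrefixOf]; exact fun h => absurd h.symm hc
        simp only [hp, Bool.false_eq_true, if_false]
        rw [ih _ _ _ (by simpa using Nat.lt_of_succ_lt_succ hf)]
        simp [pySplitDash, hc]

theorem splitOn_eq (t : List Char) : PySem.Chars.splitOn t ['-'] = pySplitDash [] t := by
  have := go_eq t (t.length + 1) [] [] (by omega)
  simpa [PySem.Chars.splitOn] using this

theorem lengths_split (s : List Char) : ∀ pre : List Char,
    (pySplitDash pre (s.filter (fun c => c = '+' || c = '-'))).map List.length =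
      runsC pre.length s := by
  induction s with
  | nil => intro pre; simp [pySplitDash, runsC]
  | cons c rest ih =>
    intro pre
    by_cases h1 : c = '+'
    · subst h1
      simp only [List.filter_cons, decide_true, Bool.true_or, if_true, runsC]
      have := ih (pre ++ ['+'])
      simpa using this
    · by_cases h2 : c = '-'
      · subst h2
        simp only [List.filter_cons]
        norm_num [pySplitDash, runsC, h1]
        exact ih []
      · simp [h1, h2, runsC, ih pre]

-- B main reduction
theorem bFold (segs : List (List Char)) : ∀ (tot : Nat) (memo : PySem.Dict Nat Nat), InvM memo →
    (segs.foldl (fun (st : Nat × PySem.Dict Nat Nat) seg =>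
      (st.1 ^^^ (bGrundy seg.length st.2).1, (bGrundy seg.length st.2).2)) (tot, memo)).1 =
      (segs.map List.length).foldl (fun t r => t ^^^ Gm r) tot := by
  induction segs with
  | nil => intro tot memo _; simp
  | cons seg rest ih =>
    intro tot memo hInv
    obtain ⟨h1, h2⟩ := bGrundy_correct seg.length memo hInv
    simp only [List.foldl_cons, List.map_cons]
    rw [ih _ _ h2, h1]

theorem altEq (cs : String) :
    canWin_ans_GameTheory_alt cs = (xorG (runsC 0 cs.toList) != 0) := by
  have hInv : InvM PySem.Dict.empty := by
    intro k v h
    simp [PySem.Dict.get?_empty] at h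
  show ((((PySem.Chars.splitOn (cs.toList.filter (fun c => c = '+' || c = '-')) ['-']).foldl
      (fun (st : Nat × PySem.Dict Nat Nat) seg =>
        (st.1 ^^^ (bGrundy seg.length st.2).1, (bGrundy seg.length st.2).2))
      (0, PySem.Dict.empty)).1 != 0) = _)
  rw [splitOn_eq, bFold _ _ _ hInv, lengths_split cs.toList []]
  simp [xorG]

-- A-side parse
theorem runsCP (u : List Char) : ∀ cur, runsC cur u = (runsP cur u).1 ++ [(runsP cur u).2] := by
  induction u with
  | nil => intro cur; simp [runsC, runsP]
  | cons c rest ih =>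
    intro cur
    by_cases h1 : c = '+'
    · simp [runsC, runsP, h1, ih]
    · by_cases h2 : c = '-'
      · simp [runsC, runsP, h2, ih]
      · simp [runsC, runsP, h1, h2, ih]

theorem runsP_concat (u : List Char) (c : Char) : ∀ cur,
    runsP cur (u ++ [c]) =
      (if c = '+' then ((runsP cur u).1, (runsP cur u).2 + 1)
       else if c = '-' then ((runsP cur u).1 ++ [(runsP cur u).2], 0)
       else runsP cur u) := by
  induction u with
  | nil =>
    intro cur
    by_cases h1 : c = '+'
    · simp [runsP, h1]
    · by_cases h2 : c = '-'
      · simp [runsP, h2]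
      · simp [runsP, h1, h2]
  | cons d rest ih =>
    intro cur
    by_cases h1 : d = '+'
    · simp [runsP, h1, ih]
    · by_cases h2 : d = '-'
      · simp only [List.cons_append, runsP, h2, if_true, ih]
        by_cases g1 : c = '+' <;> by_cases g2 : c = '-' <;> simp [g1, g2]
      · simp [runsP, h1, h2, ih]

theorem mfold_le (rs : List Nat) : ∀ mx, mx ≤ mfold mx rs := by
  induction rs with
  | nil => intro mx; simp [mfold]
  | cons r rest ih =>
    intro mx
    calc mx ≤ max mx (r : Int) := le_max_left _ _
      _ ≤ mfold (max mx (r : Int)) rest := ih _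
      _ = mfold mx (r :: rest) := by simp [mfold]

theorem le_mfold {rs : List Nat} {r : Nat} (h : r ∈ rs) : ∀ mx, (r : Int) ≤ mfold mx rs := by
  induction rs with
  | nil => cases h
  | cons a rest ih =>
    intro mx
    rcases List.mem_cons.mp h with rfl | hm
    · calc (r : Int) ≤ max mx (r : Int) := le_max_right _ _
        _ ≤ mfold (max mx (r : Int)) rest := mfold_le _ _
        _ = mfold mx (r :: rest) := by simp [mfold]
    · have := ih hm (max mx (a : Int))
      simpa [mfold] using this

theorem mfold_concat (rs : List Nat) (r : Nat) (mx : Int) :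
    mfold mx (rs ++ [r]) = max (mfold mx rs) (r : Int) := by
  simp [mfold]

-- the A parse fold (character-level step, no last-index test)
def cStep (st : Int × Int × List Int) (c : Char) : Int × Int × List Int :=
  let cur := if c = '+' then st.1 + 1 else st.1
  if c = '-' then ((0 : Int), max st.2.1 cur, if 2 ≤ cur then st.2.2 ++ [cur] else st.2.2)
  else (cur, st.2.1, st.2.2)

theorem cFold (u : List Char) : ∀ (cur : Nat) (mx : Int) (bd : List Int),
    u.foldl cStep ((cur : Int), mx, bd) =
      (((runsP cur u).2 : Int), mfold mx (runsP cur u).1,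
        bd ++ ((runsP cur u).1.filter (fun r => 2 ≤ r)).map (fun (r : Nat) => (r : Int))) := by
  induction u with
  | nil => intro cur mx bd; simp [runsP, mfold]
  | cons c rest ih =>
    intro cur mx bd
    by_cases h1 : c = '+'
    · subst h1
      rw [List.foldl_cons]
      show rest.foldl cStep (((cur : Int) + 1), mx, bd) = _
      have : ((cur : Int) + 1) = ((cur + 1 : Nat) : Int) := by push_cast; ring
      rw [this, ih]
      simp [runsP]
    · by_cases h2 : c = '-'
      · subst h2
        rw [List.foldl_cons]
        have hs : cStep ((cur : Int), mx, bd) '-' =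
            ((0 : Int), max mx (cur : Int), if 2 ≤ (cur : Int) then bd ++ [(cur : Int)] else bd) := by
          simp [cStep]
        rw [hs]
        have h0 : ((0 : Int)) = ((0 : Nat) : Int) := by simp
        rw [h0, ih]
        have hif : (if 2 ≤ (cur : Int) then bd ++ [(cur : Int)] else bd) =
            bd ++ (if 2 ≤ cur then [(cur : Int)] else []) := by
          by_cases h : 2 ≤ cur
          · rw [if_pos (by exact_mod_cast h), if_pos h]
          · rw [if_neg (by exact_mod_cast h), if_neg h]; simp
        rw [hif]
        simp [runsP, mfold, List.filter_cons]
        by_cases h : 2 ≤ cur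
        · simp [h]
        · simp [h]
      · rw [List.foldl_cons]
        have hs : cStep ((cur : Int), mx, bd) c = ((cur : Int), mx, bd) := by
          simp [cStep, h1, h2]
        rw [hs, ih]
        simp [runsP, h1, h2]

theorem aParse (s : List Char) :
    (PySem.List.pyRange 0 (s.length : Int) 1).foldl
      (fun (st : Int × Int × List Int) i =>
        let curlen := if PySem.List.pyGetD s i ' ' = '+' then st.1 + 1 else st.1
        if i + 1 = (s.length : Int) ∨ PySem.List.pyGetD s i ' ' = '-' then
          ((0 : Int), max st.2.1 curlen, if 2 ≤ curlen then st.2.2 ++ [curlen] else st.2.2)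
        else
          (curlen, st.2.1, st.2.2))
      ((0 : Int), (0 : Int), ([] : List Int)) =
    ((0 : Int), mfold 0 (runsC 0 s),
      ((runsC 0 s).filter (fun r => 2 ≤ r)).map (fun (r : Nat) => (r : Int))) := by
  rcases List.eq_nil_or_concat s with rfl | ⟨u, c, rfl⟩
  · rw [List.length_nil, Nat.cast_zero, PySem.List.pyRange_one_eq_nil (le_refl _)]
    simp [runsC, mfold]
  · simp only [List.concat_eq_append]
    rw [show (((u ++ [c]).length : Nat) : Int) = (((u.length + 1 : Nat)) : Int) by simp,
      PySem.List.pyRange_zero_nat (u.length + 1), List.foldl_map, List.range_succ,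
      List.foldl_append]
    have hpre : (List.range u.length).foldl
        (fun (st : Int × Int × List Int) (k : Nat) =>
          let curlen := if PySem.List.pyGetD (u ++ [c]) (k : Int) ' ' = '+' then st.1 + 1 else st.1
          if (k : Int) + 1 = (((u.length + 1 : Nat)) : Int) ∨ PySem.List.pyGetD (u ++ [c]) (k : Int) ' ' = '-' then
            ((0 : Int), max st.2.1 curlen, if 2 ≤ curlen then st.2.2 ++ [curlen] else st.2.2)
          else
            (curlen, st.2.1, st.2.2))
        ((0 : Int), (0 : Int), ([] : List Int)) =
        u.foldl cStep ((0 : Int), (0 : Int), ([] : List Int)) := by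
      rw [PySem.List.foldl_congr_mem _ _ (fun st (k : Nat) => cStep st (u.getD k ' ')) _ ?_]
      · rw [← List.foldl_map]
        congr 1
        apply List.ext_getElem
        · simp
        · intro i h1 h2
          simp only [List.getElem_map, List.getElem_range]
          rw [List.getD_eq_getElem u ' ' (by simpa using h2)]
      · intro acc k hk
        have hklt : k < u.length := List.mem_range.mp hk
        have hget : PySem.List.pyGetD (u ++ [c]) (k : Int) ' ' = u.getD k ' ' := by
          rw [PySem.List.pyGetD_natCast,
            List.getD_eq_getElem _ ' ' (by simpa using Nat.lt_succ_of_lt hklt),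
            List.getD_eq_getElem _ ' ' hklt]
          simp [hklt]
        have hne : ¬ ((k : Int) + 1 = (((u.length + 1 : Nat)) : Int)) := by
          push_cast
          omega
        rw [hget]
        simp only [cStep]
        by_cases hc : u.getD k ' ' = '-'
        · rw [if_pos (Or.inr hc), if_pos hc]
        · rw [if_neg (by tauto), if_neg hc]
    rw [hpre, show ((0 : Int), (0 : Int), ([] : List Int)) =
        (((0 : Nat) : Int), (0 : Int), ([] : List Int)) by norm_num, cFold]
    -- the last loop iteration (i = len(s) - 1) closes the trailing run
    rw [List.foldl_cons, List.foldl_nil]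
    have hgetc : PySem.List.pyGetD (u ++ [c]) ((u.length : Nat) : Int) ' ' = c := by
      rw [PySem.List.pyGetD_natCast, List.getD_eq_getElem _ ' ' (by simp)]
      simp
    have htrue : ((u.length : Int) + 1 = (((u.length + 1 : Nat)) : Int) ∨
        PySem.List.pyGetD (u ++ [c]) ((u.length : Nat) : Int) ' ' = '-') := by
      left
      push_cast
      ring
    simp only [hgetc]
    rw [runsCP, runsP_concat]
    have hcond : ((u.length : Int) + 1 = ((u.length + 1 : Nat) : Int)) := by push_cast; ring
    have hsing : ∀ (bd : List Int) (t : Nat),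
        (if (2 : Int) ≤ (t : Int) then bd ++ [(t : Int)] else bd) =
          bd ++ (List.filter (fun r => decide (2 ≤ r)) [t]).map (fun (r : Nat) => (r : Int)) := by
      intro bd t
      by_cases h : 2 ≤ t
      · rw [if_pos (by exact_mod_cast h)]; simp [h]
      · rw [if_neg (by exact_mod_cast h)]; simp [h]
    by_cases h1 : c = '+'
    · subst h1
      rw [if_pos (Or.inl hcond)]
      simp only [if_true, Prod.mk.injEq]
      refine ⟨trivial, ?_, ?_⟩
      · rw [mfold_concat]
        congr 1
      · rw [List.filter_append, List.map_append, List.nil_append,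
          show ((runsP 0 u).2 : Int) + 1 = (((runsP 0 u).2 + 1 : Nat) : Int) by push_cast; ring]
        exact hsing _ _
    · by_cases h2 : c = '-'
      · subst h2
        rw [if_pos (Or.inl hcond)]
        simp only [h1, if_true, if_false, Prod.mk.injEq]
        refine ⟨trivial, ?_, ?_⟩
        · rw [mfold_concat, mfold_concat]
          rw [Nat.cast_zero, max_eq_left
            (le_trans (Int.natCast_nonneg _) (le_max_right (mfold 0 (runsP 0 u).1) _))]
        · rw [List.filter_append, List.filter_append, List.map_append, List.map_append,
            List.nil_append]
          have h0 : (List.filter (fun r => decide (2 ≤ r)) [0]).map (fun (r : Nat) => (r : Int)) = [] := by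
            simp
          rw [h0, List.append_nil]
          exact hsing _ _
      · rw [if_pos (Or.inl hcond)]
        simp only [h1, h2, if_false, Prod.mk.injEq]
        refine ⟨trivial, ?_, ?_⟩
        · rw [mfold_concat]
        · rw [List.filter_append, List.map_append, List.nil_append]
          exact hsing _ _

-- A's firstMissingNumber over a set of (casts of) naturals is B's mex
theorem fmn_eq (ns : List Nat) (lut : PySem.Set Int)
    (hnd : lut.Nodup)
    (hmem : ∀ m : Nat, ((m : Int) ∈ lut ↔ m ∈ ns))
    (_hpos : ∀ x ∈ lut, 0 ≤ x) :
    fmnA lut = (bMex ns 0 : Int) := by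
  set k := bMex ns 0 with hk
  obtain ⟨hnm, -, hall⟩ := bMex_spec ns 0
  have hkn : (k : Int) ∉ lut := fun h => hnm ((hmem k).mp h)
  have hlow : ∀ j : Nat, j < k → (j : Int) ∈ lut := fun j hj => (hmem j).mpr (hall j (Nat.zero_le _) hj)
  have hkm : k ≤ lut.length := by
    have hnodm : ((List.range k).map (fun (j : Nat) => (j : Int))).Nodup :=
      List.Nodup.map (fun a b h => by exact_mod_cast h) List.nodup_range
    have hsub : ((List.range k).map (fun (j : Nat) => (j : Int))).toFinset ⊆ lut.toFinset := by
      intro x hx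
      rw [List.mem_toFinset] at hx ⊢
      obtain ⟨j, hj, rfl⟩ := List.mem_map.mp hx
      exact hlow j (List.mem_range.mp hj)
    have h1 : ((List.range k).map (fun (j : Nat) => (j : Int))).toFinset.card = k := by
      rw [List.toFinset_card_of_nodup hnodm, List.length_map, List.length_range]
    have h2 : lut.toFinset.card = lut.length := List.toFinset_card_of_nodup hnd
    have := Finset.card_le_card hsub
    omega
  have hfm : fmnA lut =
      (match (PySem.List.pyRange 0 (lut.length : Int)).find?
          (fun i => !(PySem.Set.contains lut i)) with
        | some i => i
        | none => (lut.length : Int)) := rfl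
  rw [hfm, PySem.List.pyRange_one_append 0 (k : Int) (lut.length : Int)
    (by exact_mod_cast Nat.zero_le k) (by exact_mod_cast hkm)]
  rw [List.find?_append]
  have h1 : (PySem.List.pyRange 0 (k : Int)).find? (fun i => !(PySem.Set.contains lut i)) = none := by
    rw [List.find?_eq_none]
    intro x hx
    have ⟨hx0, hxk⟩ := PySem.List.mem_pyRange_one.mp hx
    have hx' : x = ((x.toNat : Nat) : Int) := by omega
    have : x ∈ lut := by
      rw [hx']
      exact hlow x.toNat (by omega)
    simp [this]
  rw [h1]
  rcases Nat.lt_or_ge k lut.length with h | h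
  · rw [PySem.List.pyRange_one_cons (by exact_mod_cast h)]
    simp [hkn]
  · have hkeq : k = lut.length := le_antisymm hkm h
    rw [hkeq]
    simp [PySem.List.pyRange_one_eq_nil (le_refl _)]

-- half-range split set has the same members as the full-range one
theorem half_full (j x : Nat) (hj : 2 ≤ j) :
    (∃ a, a < j / 2 ∧ x = Gm a ^^^ Gm (j - 2 - a)) ↔
      (∃ i, i < j - 1 ∧ x = Gm i ^^^ Gm (j - 2 - i)) := by
  constructor
  · rintro ⟨a, ha, rfl⟩
    exact ⟨a, by omega, rfl⟩
  · rintro ⟨i, hi, rfl⟩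
    rcases Nat.lt_or_ge i (j / 2) with h | h
    · exact ⟨i, h, rfl⟩
    · refine ⟨j - 2 - i, by omega, ?_⟩
      have : j - 2 - (j - 2 - i) = i := by omega
      rw [this, Nat.xor_comm]

-- Grundy table correctness
theorem tableEq (M : Nat) (k : Nat) (hk : k ≤ M) :
    PySem.List.pyGetD
      ((PySem.List.pyRange 2 ((M : Int) + 1) 1).foldl
        (fun g l =>
          let gsub := (PySem.List.pyRange 0 (PySem.Int.floordiv l 2) 1).foldl
            (fun (sub : PySem.Set Int) a =>
              PySem.Set.add sub (PySem.Int.bxor (PySem.List.pyGetD g a 0) (PySem.List.pyGetD g (l - a - 2) 0)))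
            PySem.Set.empty
          PySem.List.pySetD g l (fmnA gsub))
        (List.replicate (M + 1) (0 : Int)))
      (k : Int) 0 = (Gm k : Int) := by
  rcases Nat.lt_or_ge M 1 with hM | hM
  · -- M = 0: the range 2..M+1 is empty and Gm 0 = 0
    interval_cases M
    rw [PySem.List.pyRange_one_eq_nil (by norm_num)]
    interval_cases k
    simp [Gm_small]
  · have main : ∀ (d j : Nat), 2 ≤ j → j + d = M + 1 →
        ∀ gt : List Int, gt.length = M + 1 →
        (∀ k', k' < j → k' ≤ M → PySem.List.pyGetD gt (k' : Int) 0 = (Gm k' : Int)) →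
        ∀ k', k' ≤ M → PySem.List.pyGetD
          ((PySem.List.pyRange (j : Int) ((M : Int) + 1) 1).foldl
            (fun g l =>
              let gsub := (PySem.List.pyRange 0 (PySem.Int.floordiv l 2) 1).foldl
                (fun (sub : PySem.Set Int) a =>
                  PySem.Set.add sub (PySem.Int.bxor (PySem.List.pyGetD g a 0) (PySem.List.pyGetD g (l - a - 2) 0)))
                PySem.Set.empty
              PySem.List.pySetD g l (fmnA gsub)) gt)
          (k' : Int) 0 = (Gm k' : Int) := by
      intro d
      induction d with
      | zero =>
        intro j hj2 hjd gt hlen hbelow k' hk'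
        rw [PySem.List.pyRange_one_eq_nil (by exact_mod_cast Nat.le_of_eq (by omega))]
        simp only [List.foldl_nil]
        exact hbelow k' (by omega) hk'
      | succ d ihd =>
        intro j hj2 hjd gt hlen hbelow k' hk'
        have hjM : j ≤ M := by omega
        rw [PySem.List.pyRange_one_cons (by exact_mod_cast (by omega : j < M + 1))]
        rw [List.foldl_cons]
        -- the computed set of subgame xors
        have hfd : PySem.Int.floordiv (j : Int) 2 = ((j / 2 : Nat) : Int) := by
          exact_mod_cast PySem.Int.floordiv_natCast j 2
        have hgsub : (PySem.List.pyRange 0 (PySem.Int.floordiv (j : Int) 2) 1).foldl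
              (fun (sub : PySem.Set Int) a =>
                PySem.Set.add sub (PySem.Int.bxor (PySem.List.pyGetD gt a 0) (PySem.List.pyGetD gt ((j : Int) - a - 2) 0)))
              PySem.Set.empty =
            PySem.Set.ofList ((List.range (j / 2)).map
              (fun a => ((Gm a ^^^ Gm (j - 2 - a) : Nat) : Int))) := by
          rw [hfd, PySem.List.pyRange_zero_nat, List.foldl_map]
          rw [PySem.List.foldl_congr_mem _ _
            (fun (sub : PySem.Set Int) (a : Nat) =>
              PySem.Set.add sub ((Gm a ^^^ Gm (j - 2 - a) : Nat) : Int)) _ ?_]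
          · rw [← PySem.Set.update_map_eq_foldl_add, PySem.Set.update_empty]
          · intro acc a ha
            have ha2 : a < j / 2 := List.mem_range.mp ha
            have h1 : PySem.List.pyGetD gt (a : Int) 0 = (Gm a : Int) :=
              hbelow a (by omega) (by omega)
            have hcast : (j : Int) - (a : Int) - 2 = ((j - a - 2 : Nat) : Int) := by
              have : a + 2 ≤ j := by omega
              omega
            have h2 : PySem.List.pyGetD gt ((j : Int) - (a : Int) - 2) 0 = (Gm (j - a - 2) : Int) := by
              rw [hcast]
              exact hbelow (j - a - 2) (by omega) (by omega)
            have heq : j - a - 2 = j - 2 - a := by omega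
            rw [h1, h2, heq, PySem.Int.bxor_natCast]
        have hfmn : fmnA (PySem.Set.ofList ((List.range (j / 2)).map
              (fun a => ((Gm a ^^^ Gm (j - 2 - a) : Nat) : Int)))) = (Gm j : Int) := by
          rw [fmn_eq ((List.range (j / 2)).map (fun a => Gm a ^^^ Gm (j - 2 - a)))]
          · congr 1
            rw [Gm_def j]
            apply bMex_congr
            intro x
            rw [List.mem_map]
            constructor
            · rintro ⟨a, ha, rfl⟩
              rw [mem_GmList]
              exact (half_full j _ hj2).mp ⟨a, List.mem_range.mp ha, rfl⟩
            · intro hx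
              obtain ⟨a, ha, rfl⟩ := (half_full j _ hj2).mpr ((mem_GmList j x).mp hx)
              exact ⟨a, List.mem_range.mpr ha, rfl⟩
          · exact PySem.Set.nodup_ofList _
          · intro m
            rw [PySem.Set.mem_ofList, List.mem_map, List.mem_map]
            constructor
            · rintro ⟨a, ha, hv⟩
              exact ⟨a, ha, by exact_mod_cast hv⟩
            · rintro ⟨a, ha, hv⟩
              exact ⟨a, ha, by exact_mod_cast hv⟩
          · intro x hx
            rw [PySem.Set.mem_ofList, List.mem_map] at hx
            obtain ⟨a, -, rfl⟩ := hx
            positivity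
        simp only [hgsub, hfmn]
        have hj1cast : ((j : Int) + 1) = (((j + 1 : Nat)) : Int) := by push_cast; ring
        rw [hj1cast]
        apply ihd (j + 1) (by omega) (by omega)
        · rw [PySem.List.length_pySetD]; exact hlen
        · intro k2 hk2 hk2M
          rw [PySem.List.pyGetD_pySetD_natCast gt j k2 _ 0 (by omega)]
          by_cases hkj : k2 = j
          · rw [if_pos hkj, hkj]
          · rw [if_neg hkj]
            exact hbelow k2 (by omega) hk2M
        · exact hk'
    apply main (M - 1) 2 (le_refl _) (by omega) _ (by simp) _ k hk
    intro k' hk' hk'M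
    rw [PySem.List.pyGetD_natCast, List.getD_replicate _ (by omega), Gm_small hk']
    simp

theorem xor_cast_fold (rs : List Nat) : ∀ acc : Nat,
    rs.foldl (fun a r => PySem.Int.bxor a ((Gm r : Nat) : Int)) (acc : Int) =
      ((rs.foldl (fun a r => a ^^^ Gm r) acc : Nat) : Int) := by
  induction rs with
  | nil => intro acc; simp
  | cons r rest ih =>
    intro acc
    simp only [List.foldl_cons, PySem.Int.bxor_natCast]
    exact ih _

theorem xor_filter (rs : List Nat) : ∀ acc : Nat,
    (rs.filter (fun r => 2 ≤ r)).foldl (fun t r => t ^^^ Gm r) acc =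
      rs.foldl (fun t r => t ^^^ Gm r) acc := by
  induction rs with
  | nil => intro acc; simp
  | cons r rest ih =>
    intro acc
    by_cases h : 2 ≤ r
    · simp only [List.filter_cons, h, decide_true, if_true, List.foldl_cons, ih]
    · have : Gm r = 0 := Gm_small (by omega)
      simp only [List.filter_cons, decide_eq_true_eq, h, if_false, List.foldl_cons, this,
        Nat.xor_zero, ih]

theorem aEq (cs : String) :
    canWin_ans_GameTheory cs = (xorG (runsC 0 cs.toList) != 0) := by
  simp only [canWin_ans_GameTheory]
  rw [aParse cs.toList]
  have hM0 : 0 ≤ mfold 0 (runsC 0 cs.toList) := mfold_le _ 0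
  have hMcast : mfold 0 (runsC 0 cs.toList) = ((mfold 0 (runsC 0 cs.toList)).toNat : Int) :=
    (Int.toNat_of_nonneg hM0).symm
  rw [hMcast]
  set M := (mfold 0 (runsC 0 cs.toList)).toNat with hMdef
  rw [show ((M : Int) + 1).toNat = M + 1 by omega]
  rw [List.foldl_map]
  rw [PySem.List.foldl_congr_mem _ _
    (fun (acc : Int) (r : Nat) => PySem.Int.bxor acc ((Gm r : Nat) : Int)) _ ?_]
  · rw [show (0 : Int) = ((0 : Nat) : Int) by simp, xor_cast_fold, xor_filter]
    simp [xorG, bne]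
  · intro acc r hr
    have hrm : r ∈ runsC 0 cs.toList := List.mem_of_mem_filter hr
    have hle : (r : Int) ≤ (M : Int) := by
      rw [← hMcast]
      exact le_mfold hrm 0
    rw [tableEq M r (by exact_mod_cast hle)]

-- ===== VERDICT (by name: the statement is the Claim_ definition above) =====
theorem canWin_ans_GameTheory_spec : Claim_equal_canWin_ans_GameTheory := by
  intro cs _
  unfold Spec_canWin_ans_GameTheory
  rw [aEq, altEq]
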